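-- pv_equiv track=rewrite | github.com/Destiny0504/Chinese-word-segmentation | MCCWS/dataset/dataset.py | labelling
-- ===== SOURCE A (Python) =====
-- def labelling(dataset_label, answer):
--   """
--       labelling the data
--
--       B : begin of a word
--       M : middle of a word
--       E : end of a word
--       S : a single word
--
--   Args:
--       dataset_label (_type_): _description_
--       answer (_type_): _description_
--
--   Returns:
--       _type_: _description_
--   """
--   labeled = []
--   transform = {'B': 0, 'M': 1, 'E': 2, 'S': 3}
--   for data in answer:
--     tmp = []
--     for data_seg in data:
--       if len(data_seg) == 1:
--         tmp.append('S')
--       elif len(data_seg) == 2: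
--         tmp.append('BE')
--       else:
--         tmp.append('B' + ('M' * (len(data_seg) - 2)) + 'E')
--     labeled.append([dataset_label] + [transform[label] for label in ''.join(tmp)])
--   return labeled
-- ===== SOURCE B (Python) =====
-- def labelling(dataset_label, answer):
--   """Emit the integer BMES labels directly in one pass: no label-string
--   building, no ''.join, no transform dict."""
--   labeled = []
--   for data in answer:
--     row = [dataset_label]
--     for seg in data:
--       if len(seg) == 1:
--         row.append(3)
--       else:
--         row.extend([0] + [1] * (len(seg) - 2) + [2])
--     labeled.append(row)
--   return labeled
-- ===== Notes on version B (the rewrite author's own statement) =====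
-- stated objective: simpler
-- what changed: B emits the integer BMES labels for each word directly in one pass, dropping A's intermediate per-word label-string building, the ''.join, and the transform dict translation phase.
import Mathlib
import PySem

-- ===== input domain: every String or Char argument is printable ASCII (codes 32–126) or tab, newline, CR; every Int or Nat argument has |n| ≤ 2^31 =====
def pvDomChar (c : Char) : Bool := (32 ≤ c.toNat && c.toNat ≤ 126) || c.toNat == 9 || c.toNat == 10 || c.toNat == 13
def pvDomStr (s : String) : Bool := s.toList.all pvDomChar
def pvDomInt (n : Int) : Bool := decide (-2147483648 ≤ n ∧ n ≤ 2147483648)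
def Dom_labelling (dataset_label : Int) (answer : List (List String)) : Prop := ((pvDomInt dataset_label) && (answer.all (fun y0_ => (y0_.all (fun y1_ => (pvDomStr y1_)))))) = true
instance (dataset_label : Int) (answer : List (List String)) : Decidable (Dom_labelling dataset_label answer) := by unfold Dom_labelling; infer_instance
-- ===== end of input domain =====

-- B replaces A's two-phase build (per-word label strings, ''.join, dict translation)
-- by emitting the integer labels directly in one pass; objective: simpler.

-- ===== PORT A =====
-- label strings are ported as List Char (PySem.Chars is the exact string model);
-- 'M' * (len-2) is PySem.List.pyRepeat (exact, empty on a negative count);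
-- transform[label] : every label produced is a key of transform, so get?.getD 0 never
-- takes the default.
def labelling (dataset_label : Int) (answer : List (List String)) : List (List Int) :=
  let transform : PySem.Dict Char Int := PySem.Dict.ofList [('B', 0), ('M', 1), ('E', 2), ('S', 3)]
  answer.foldl (fun labeled data =>
    let tmp : List (List Char) := data.foldl (fun tmp data_seg =>
      if PySem.Str.len data_seg = 1 then tmp ++ [['S']]
      else if PySem.Str.len data_seg = 2 then tmp ++ [['B', 'E']]
      else tmp ++ [['B'] ++ PySem.List.pyRepeat ['M'] (PySem.Str.len data_seg - 2) ++ ['E']]) []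
    labeled ++ [[dataset_label] ++ (PySem.Chars.join [] tmp).map (fun label => (transform.get? label).getD 0)]) []

-- ===== PORT B =====
def labelling_alt (dataset_label : Int) (answer : List (List String)) : List (List Int) :=
  answer.foldl (fun labeled data =>
    labeled ++ [data.foldl (fun row seg =>
      if PySem.Str.len seg = 1 then row ++ [3]
      else row ++ ([0] ++ PySem.List.pyRepeat [1] (PySem.Str.len seg - 2) ++ [2])) [dataset_label]]) []

-- ===== PRECONDITION & SPEC =====
def Spec_labelling (dataset_label : Int) (answer : List (List String)) (out : List (List Int)) : Prop := out = labelling_alt dataset_label answer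
instance (dataset_label : Int) (answer : List (List String)) (out : List (List Int)) : Decidable (Spec_labelling dataset_label answer out) := by unfold Spec_labelling; infer_instance

-- ===== CLAIM (what is proved, stated in full; the proofs are below) =====
def Claim_equal_labelling : Prop := ∀ (dataset_label : Int) (answer : List (List String)), Dom_labelling dataset_label answer → Spec_labelling dataset_label answer (labelling dataset_label answer)

-- ===== LEMMAS AND PROOFS =====

-- A's per-word label string
def pvLblA (seg : String) : List Char :=
  if PySem.Str.len seg = 1 then ['S']
  else if PySem.Str.len seg = 2 then ['B', 'E']
  else ['B'] ++ PySem.List.pyRepeat ['M'] (PySem.Str.len seg - 2) ++ ['E']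

-- B's per-word integer code
def pvCodeB (seg : String) : List Int :=
  if PySem.Str.len seg = 1 then [3]
  else [0] ++ PySem.List.pyRepeat [1] (PySem.Str.len seg - 2) ++ [2]

def pvTrans (c : Char) : Int :=
  ((PySem.Dict.ofList [('B', (0:Int)), ('M', 1), ('E', 2), ('S', 3)]).get? c).getD 0

lemma pvTrans_B : pvTrans 'B' = 0 := by decide
lemma pvTrans_M : pvTrans 'M' = 1 := by decide
lemma pvTrans_E : pvTrans 'E' = 2 := by decide
lemma pvTrans_S : pvTrans 'S' = 3 := by decide

lemma pvTrans_lblA (seg : String) : (pvLblA seg).map pvTrans = pvCodeB seg := by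
  unfold pvLblA pvCodeB
  split_ifs with h1 h2
  · simp [pvTrans_S]
  · rw [h2]; simp [PySem.List.pyRepeat_singleton, pvTrans_B, pvTrans_E]
  · simp [PySem.List.pyRepeat_singleton, List.map_replicate,
      pvTrans_B, pvTrans_M, pvTrans_E]

lemma pvJoin_nil_flatten (xs : List (List Char)) :
    PySem.Chars.join [] xs = xs.flatten := by
  induction xs with
  | nil => rfl
  | cons y ys ih =>
    cases ys with
    | nil => simp [PySem.Chars.join_singleton]
    | cons z zs =>
      rw [PySem.Chars.join_cons_cons]
      simp only [List.flatten_cons] at *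
      simp [ih]

lemma pvRow_eq (dataset_label : Int) (data : List String) :
    [dataset_label] ++ (PySem.Chars.join []
        (data.foldl (fun tmp seg => tmp ++ [pvLblA seg]) [])).map pvTrans
    = data.foldl (fun row seg => row ++ pvCodeB seg) [dataset_label] := by
  rw [PySem.List.foldl_append_eq_flatMap (g := fun seg => [pvLblA seg]),
      PySem.List.foldl_append_eq_flatMap (g := pvCodeB)]
  simp only [List.nil_append, pvJoin_nil_flatten]
  congr 1
  induction data with
  | nil => rfl
  | cons s ss ih =>
    simp only [List.flatMap_cons, List.flatten_append, List.flatten_cons,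
      List.flatten_nil, List.append_nil, List.map_append, ih, pvTrans_lblA]

-- ===== VERDICT (by name: the statement is the Claim_ definition above) =====
theorem labelling_spec : Claim_equal_labelling := by
  intro dataset_label answer hdom
  clear hdom
  unfold Spec_labelling labelling labelling_alt
  induction answer using List.reverseRecOn with
  | nil => rfl
  | append_singleton rest data ih =>
    simp only [List.foldl_append, List.foldl_cons, List.foldl_nil]
    rw [ih]
    congr 1
    congr 1
    have h1 : ∀ (l : List (List Char)) (data : List String),
        data.foldl (fun tmp data_seg =>
          if PySem.Str.len data_seg = 1 then tmp ++ [['S']]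
          else if PySem.Str.len data_seg = 2 then tmp ++ [['B', 'E']]
          else tmp ++ [['B'] ++ PySem.List.pyRepeat ['M'] (PySem.Str.len data_seg - 2) ++ ['E']]) l
        = data.foldl (fun tmp seg => tmp ++ [pvLblA seg]) l := by
      intro l d
      induction d generalizing l with
      | nil => rfl
      | cons s ss ihd => simp only [List.foldl_cons, pvLblA]; split_ifs <;> exact ihd _
    have h2 : ∀ (l : List Int) (data : List String),
        data.foldl (fun row seg =>
          if PySem.Str.len seg = 1 then row ++ [3]
          else row ++ ([0] ++ PySem.List.pyRepeat [1] (PySem.Str.len seg - 2) ++ [2])) l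
        = data.foldl (fun row seg => row ++ pvCodeB seg) l := by
      intro l d
      induction d generalizing l with
      | nil => rfl
      | cons s ss ihd => simp only [List.foldl_cons, pvCodeB]; split_ifs <;> exact ihd _
    rw [h1, h2, ← pvRow_eq]
    rfl
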